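-- pv_equiv track=rewrite | github.com/radcarpet/preempt-experiments | privacypromptrewriting/.ipynb_checkpoints/utils-checkpoint.py | format_new_number
-- ===== SOURCE A (Python) =====
-- def format_new_number(phone_number, new_number):
--     # Extract all non-numeric characters
--     non_numeric_chars = ''.join(char for char in phone_number if not char.isdigit())
--     reintroduced_number = ''
--     non_numeric_index = 0
--     numeric_index = 0
--
--     for char in phone_number:
--         if not char.isdigit():
--             reintroduced_number += non_numeric_chars[non_numeric_index]
--             non_numeric_index += 1
--         else:
--             reintroduced_number += new_number[numeric_index]
--             numeric_index += 1
--
--     return reintroduced_number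
-- ===== SOURCE B (Python) =====
-- def format_new_number(phone_number, new_number):
--     # Index table of digit positions, then in-place substitution.
--     chars = list(phone_number)
--     digit_positions = [i for i, c in enumerate(chars) if c.isdigit()]
--     for j, pos in enumerate(digit_positions):
--         chars[pos] = new_number[j]
--     return ''.join(chars)
-- ===== Notes on version B (the rewrite author's own statement) =====
-- stated objective: alternative
-- what changed: B builds an index table of the digit positions once and overwrites those positions in a char list, instead of A's char-by-char string rebuild with two running counters and a precomputed non-digit string.
import Mathlib
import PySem

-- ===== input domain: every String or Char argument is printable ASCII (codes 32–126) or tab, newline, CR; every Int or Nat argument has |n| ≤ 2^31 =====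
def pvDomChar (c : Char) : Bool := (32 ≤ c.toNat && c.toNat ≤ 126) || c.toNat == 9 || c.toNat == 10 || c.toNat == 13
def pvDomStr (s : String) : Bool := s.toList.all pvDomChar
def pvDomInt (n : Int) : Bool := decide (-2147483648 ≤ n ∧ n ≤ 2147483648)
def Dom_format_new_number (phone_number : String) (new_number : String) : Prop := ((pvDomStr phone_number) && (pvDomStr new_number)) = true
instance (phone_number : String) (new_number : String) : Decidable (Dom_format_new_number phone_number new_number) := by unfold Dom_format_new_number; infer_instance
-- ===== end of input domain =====

-- B re-inserts the new digits via an index table of the digit positions plus in-place overwrite,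
-- instead of A's char-by-char rebuild with two running counters (alternative decomposition, same cost).

-- ===== PORT A =====
-- One pass over phone_number with two counters; s[i] ports as pyGet? with default ' '
-- (Python raises IndexError exactly where pyGet? is none; Pre_ excludes those inputs).
-- char.isdigit() ports as Char.isDigit, exact on the ASCII domain.
def format_new_number (phone_number : String) (new_number : String) : String :=
  let non_numeric_chars : List Char := phone_number.toList.filter (fun c => !c.isDigit)
  let st : List Char × Int × Int :=
    phone_number.toList.foldl (fun (st : List Char × Int × Int) c =>
      if !c.isDigit then
        (st.1 ++ [(PySem.List.pyGet? non_numeric_chars st.2.1).getD ' '], st.2.1 + 1, st.2.2)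
      else
        (st.1 ++ [(PySem.Str.pyGet? new_number st.2.2).getD ' '], st.2.1, st.2.2 + 1))
      ([], 0, 0)
  String.ofList st.1

-- ===== PORT B =====
-- chars = list(phone_number); digit_positions = [i for i, c in enumerate(chars) if c.isdigit()];
-- for j, pos in enumerate(digit_positions): chars[pos] = new_number[j]; return ''.join(chars).
-- chars[pos] = … ports as List.set pos.toNat (pos is a nonnegative in-range enumerate index);
-- new_number[j] ports as pyGet? with default ' ' (Python raises exactly where it is none; see Pre_).
def format_new_number_alt (phone_number : String) (new_number : String) : String :=
  let chars : List Char := phone_number.toList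
  let digit_positions : List Int :=
    ((PySem.List.enumerate chars 0).filter (fun p => p.2.isDigit)).map (·.1)
  let chars' :=
    (PySem.List.enumerate digit_positions 0).foldl
      (fun (cs : List Char) (jp : Int × Int) =>
        cs.set jp.2.toNat ((PySem.Str.pyGet? new_number jp.1).getD ' '))
      chars
  String.ofList chars'

-- ===== PRECONDITION & SPEC =====
-- Pre_ excludes exactly the inputs on which Python A raises IndexError: more digit characters in
-- phone_number than characters in new_number (Python B raises IndexError there too).
def Pre_format_new_number (phone_number : String) (new_number : String) : Prop :=
  phone_number.toList.countP (fun c => c.isDigit) ≤ new_number.toList.length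
instance (phone_number : String) (new_number : String) : Decidable (Pre_format_new_number phone_number new_number) := by unfold Pre_format_new_number; infer_instance
def pvWitness_format_new_number : String × String := ("(123) 456-7890", "5551234567")

def Spec_format_new_number (phone_number : String) (new_number : String) (out : String) : Prop := out = format_new_number_alt phone_number new_number
instance (phone_number : String) (new_number : String) (out : String) : Decidable (Spec_format_new_number phone_number new_number out) := by unfold Spec_format_new_number; infer_instance

-- ===== CLAIM (what is proved, stated in full; the proofs are below) =====
def Claim_equal_format_new_number : Prop := ∀ (phone_number : String) (new_number : String), Dom_format_new_number phone_number new_number → Pre_format_new_number phone_number new_number → Spec_format_new_number phone_number new_number (format_new_number phone_number new_number)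

-- ===== LEMMAS AND PROOFS =====

-- Reference: walk the chars, replacing the k-th digit seen with new_number[k].
def pvRef (nn : String) : List Char → Int → List Char
  | [], _ => []
  | c :: cs, j =>
    if !c.isDigit then c :: pvRef nn cs j
    else (PySem.Str.pyGet? nn j).getD ' ' :: pvRef nn cs (j + 1)

theorem pvSet_append_length (pre : List Char) (v c : Char) (cs : List Char) :
    (pre ++ c :: cs).set pre.length v = (pre ++ [v]) ++ cs := by
  induction pre with
  | nil => simp
  | cons p ps ih => simp [ih]

-- A's loop equals pvRef: nni is the length of the already-consumed non-digit prefix `pre`.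
theorem pvLoopA_eq (nn : String) (cs : List Char) : ∀ (pre acc : List Char) (ni : Int),
    (cs.foldl (fun (st : List Char × Int × Int) c =>
      if !c.isDigit then
        (st.1 ++ [(PySem.List.pyGet? (pre ++ cs.filter (fun c => !c.isDigit)) st.2.1).getD ' '],
         st.2.1 + 1, st.2.2)
      else
        (st.1 ++ [(PySem.Str.pyGet? nn st.2.2).getD ' '], st.2.1, st.2.2 + 1))
      (acc, (pre.length : Int), ni)).1 = acc ++ pvRef nn cs ni := by
  induction cs with
  | nil => intro pre acc ni; simp [pvRef]
  | cons c cs ih =>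
    intro pre acc ni
    by_cases hc : c.isDigit
    · have h : (c :: cs).filter (fun c => !c.isDigit) = cs.filter (fun c => !c.isDigit) := by
        simp [hc]
      simp only [h, List.foldl_cons, hc, Bool.not_true, Bool.false_eq_true, if_false]
      rw [ih pre (acc ++ [(PySem.Str.pyGet? nn ni).getD ' ']) (ni + 1)]
      simp [pvRef, hc]
    · have h : (c :: cs).filter (fun c => !c.isDigit) = c :: cs.filter (fun c => !c.isDigit) := by
        simp [hc]
      have h2 : pre ++ (c :: cs).filter (fun c => !c.isDigit)
          = (pre ++ [c]) ++ cs.filter (fun c => !c.isDigit) := by simp [h]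
      have hget : PySem.List.pyGet? (pre ++ (c :: cs).filter (fun c => !c.isDigit))
          (pre.length : Int) = some c := by
        rw [h]; exact PySem.List.pyGet?_append_length pre _ c
      simp only [h2] at hget
      have hlen : ((pre.length : Int) + 1) = (((pre ++ [c]).length : Nat) : Int) := by simp
      simp only [h2, List.foldl_cons, hc, Bool.not_false, if_true, hget, Option.getD_some, hlen]
      rw [ih (pre ++ [c]) (acc ++ [c]) ni]
      simp [pvRef, hc]

-- B's loop equals pvRef: positions are enumerate indices past the consumed prefix `pre`.
theorem pvLoopB_eq (nn : String) (cs : List Char) : ∀ (pre : List Char) (j : Int),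
    (PySem.List.enumerate
        (((PySem.List.enumerate cs (pre.length : Int)).filter (fun p => p.2.isDigit)).map (·.1)) j).foldl
      (fun (xs : List Char) (jp : Int × Int) =>
        xs.set jp.2.toNat ((PySem.Str.pyGet? nn jp.1).getD ' '))
      (pre ++ cs) = pre ++ pvRef nn cs j := by
  induction cs with
  | nil => intro pre j; simp [pvRef, PySem.List.enumerate]
  | cons c cs ih =>
    intro pre j
    rw [PySem.List.enumerate_cons]
    by_cases hc : c.isDigit
    · simp only [List.filter_cons, hc, if_true, List.map_cons,
        PySem.List.enumerate_cons, List.foldl_cons]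
      have hset : (pre ++ c :: cs).set ((pre.length : Int)).toNat
          ((PySem.Str.pyGet? nn j).getD ' ')
          = (pre ++ [(PySem.Str.pyGet? nn j).getD ' ']) ++ cs := by
        rw [Int.toNat_natCast, pvSet_append_length]
      rw [hset]
      have hlen : ((pre.length : Int) + 1)
          = (((pre ++ [(PySem.Str.pyGet? nn j).getD ' ']).length : Nat) : Int) := by simp
      rw [hlen, ih (pre ++ [(PySem.Str.pyGet? nn j).getD ' ']) (j + 1)]
      simp [pvRef, hc]
    · simp only [List.filter_cons, hc, Bool.false_eq_true, if_false]
      have hlen : ((pre.length : Int) + 1) = (((pre ++ [c]).length : Nat) : Int) := by simp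
      rw [hlen, show pre ++ c :: cs = (pre ++ [c]) ++ cs by simp, ih (pre ++ [c]) j]
      simp [pvRef, hc]

-- ===== VERDICT (by name: the statement is the Claim_ definition above) =====
theorem format_new_number_spec : Claim_equal_format_new_number := by
  intro pn nn _ _
  unfold Spec_format_new_number format_new_number format_new_number_alt
  have hA := pvLoopA_eq nn pn.toList [] [] 0
  have hB := pvLoopB_eq nn pn.toList [] 0
  simp only [List.nil_append, List.length_nil, Nat.cast_zero] at hA hB
  simp only [hA, hB]
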